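-- pv_equiv track=rewrite | github.com/michielappelman/adventofcode2016 | day04/day04.py | valid_room
-- ===== SOURCE A (Python) =====
-- from collections import Counter
--
-- def valid_room(room_name, checksum):
--     characters = list("".join(room_name))
--     counter = Counter(characters)
--     most_common = counter.most_common()
--     most_common.sort(key=lambda x: x[0])
--     most_common.sort(key=lambda x: x[1], reverse=True)
--     string_most_common = "".join([c[0] for c in most_common[:5]])
--     return string_most_common == checksum
-- ===== SOURCE B (Python) =====
-- def valid_room(room_name, checksum):
--     counts = {}
--     for word in room_name:
--         for ch in word:
--             counts[ch] = counts.get(ch, 0) + 1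
--     top = []
--     for _ in range(5):
--         best = None
--         for ch, n in counts.items():
--             if ch in top:
--                 continue
--             if best is None or n > counts[best] or (n == counts[best] and ch < best):
--                 best = ch
--         if best is None:
--             break
--         top.append(best)
--     return "".join(top) == checksum
-- ===== Notes on version B (the rewrite author's own statement) =====
-- stated objective: alternative
-- what changed: Replaces A's Counter plus double stable sort of all (letter,count) items by sort-free top-5 selection: after counting into a dict, five linear scans each pick the single best remaining letter (highest count, alphabetically smallest on ties), skipping letters already taken.
import Mathlib
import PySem

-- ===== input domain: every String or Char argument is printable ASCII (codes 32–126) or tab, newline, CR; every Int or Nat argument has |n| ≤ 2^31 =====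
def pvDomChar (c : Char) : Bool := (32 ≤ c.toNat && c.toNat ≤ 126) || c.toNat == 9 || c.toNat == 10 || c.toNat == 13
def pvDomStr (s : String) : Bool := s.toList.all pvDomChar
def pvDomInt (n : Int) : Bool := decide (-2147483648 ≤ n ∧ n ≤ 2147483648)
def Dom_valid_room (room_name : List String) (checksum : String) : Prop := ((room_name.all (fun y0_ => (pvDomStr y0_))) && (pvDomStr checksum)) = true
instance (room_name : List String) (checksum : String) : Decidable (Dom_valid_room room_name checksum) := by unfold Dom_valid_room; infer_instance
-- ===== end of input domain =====

-- B replaces A's double stable sort by sort-free top-5 selection (five linear scans,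
-- each picking the best remaining letter); alternative algorithm, same exact result.

-- ===== PORT A =====
def valid_room (room_name : List String) (checksum : String) : Bool :=
  let characters : List Char := (PySem.Str.join "" room_name).toList
  let counter : PySem.Dict Char Int := PySem.Dict.counter characters
  -- Counter.most_common() is sorted(items, key=count, reverse=True) — stable; exact CPython behaviour
  let most_common := PySem.List.sorted counter.items (fun p => p.2) true
  let most_common₁ := PySem.List.sorted most_common (fun p => p.1) false
  let most_common₂ := PySem.List.sorted most_common₁ (fun p => p.2) true
  let string_most_common :=
    PySem.Str.join "" ((PySem.List.slice most_common₂ none (some 5)).map (fun p => String.ofList [p.1]))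
  string_most_common == checksum

-- ===== PORT B =====
-- the inner scan: best remaining letter (skip letters already in top)
def pickBest (counts : PySem.Dict Char Int) (top : List Char) : Option Char :=
  counts.items.foldl
    (fun best p =>
      if top.contains p.1 then best
      else
        match best with
        | none => some p.1
        | some b =>
          if counts.getD b 0 < p.2 ∨ (p.2 = counts.getD b 0 ∧ p.1 < b) then some p.1 else best)
    none

-- the 'for _ in range(5)' loop with its break
def pickLoop (counts : PySem.Dict Char Int) : Nat → List Char → List Char
  | 0, top => top
  | k + 1, top =>
    match pickBest counts top with
    | none => top
    | some b => pickLoop counts k (top ++ [b])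

def valid_room_alt (room_name : List String) (checksum : String) : Bool :=
  let counts : PySem.Dict Char Int :=
    room_name.foldl (fun d w => w.toList.foldl (fun d c => d.insert c (d.getD c 0 + 1)) d) PySem.Dict.empty
  let top : List Char := pickLoop counts 5 []
  String.ofList top == checksum

-- ===== PRECONDITION & SPEC =====
def Spec_valid_room (room_name : List String) (checksum : String) (out : Bool) : Prop := out = valid_room_alt room_name checksum
instance (room_name : List String) (checksum : String) (out : Bool) : Decidable (Spec_valid_room room_name checksum out) := by unfold Spec_valid_room; infer_instance

-- ===== CLAIM (what is proved, stated in full; the proofs are below) =====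
def Claim_equal_valid_room : Prop := ∀ (room_name : List String) (checksum : String), Dom_valid_room room_name checksum → Spec_valid_room room_name checksum (valid_room room_name checksum)

-- ===== LEMMAS AND PROOFS =====

-- the strict "count descending, then letter ascending" order both programs realise
def keyR (chars : List Char) (c d : Char) : Prop :=
  (chars.count d : Int) < chars.count c ∨ ((chars.count c : Int) = chars.count d ∧ c < d)

theorem keyR_asymm (chars : List Char) (c d : Char) (h1 : keyR chars c d) (h2 : keyR chars d c) : False := by
  unfold keyR at h1 h2
  rcases h1 with h1 | ⟨h1e, h1l⟩ <;> rcases h2 with h2 | ⟨h2e, h2l⟩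
  · omega
  · omega
  · omega
  · exact absurd (lt_trans h1l h2l) (lt_irrefl _)

-- ---- generic list lemmas ----

theorem pairwise_lt_of_le_nodup {α κ : Type} [LinearOrder κ] (f : α → κ) (l : List α)
    (h1 : l.Pairwise (fun a b => f a ≤ f b)) (h2 : (l.map f).Nodup) :
    l.Pairwise (fun a b => f a < f b) := by
  have h3 : l.Pairwise (fun a b => f a ≠ f b) := List.pairwise_map.mp h2
  exact (h1.and h3).imp (fun h => lt_of_le_of_ne h.1 h.2)

-- stability of Python's reverse sort: ties keep their input order
theorem stableR_insertBy {α κ : Type} [LinearOrder κ] (key : α → κ) (Q : α → α → Prop)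
    (x : α) (acc : List α)
    (h1 : acc.Pairwise (fun a b => key b < key a ∨ (key a = key b ∧ Q a b)))
    (h2 : ∀ a ∈ acc, key a = key x → Q a x) :
    (PySem.List.insertBy (fun a b => decide (key b < key a)) x acc).Pairwise
      (fun a b => key b < key a ∨ (key a = key b ∧ Q a b)) := by
  induction acc with
  | nil => simp [PySem.List.insertBy]
  | cons y ys ih =>
    obtain ⟨hyall, hys⟩ := List.pairwise_cons.mp h1
    by_cases h : key y < key x
    · have hstep : PySem.List.insertBy (fun a b => decide (key b < key a)) x (y :: ys)
        = x :: y :: ys := by simp [PySem.List.insertBy, h]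
      rw [hstep]
      refine List.Pairwise.cons ?_ h1
      intro b hb
      rcases List.mem_cons.mp hb with rfl | hbys
      · exact Or.inl h
      · rcases hyall b hbys with hlt | ⟨heq, _⟩
        · exact Or.inl (lt_trans hlt h)
        · exact Or.inl (heq ▸ h)
    · have hstep : PySem.List.insertBy (fun a b => decide (key b < key a)) x (y :: ys)
        = y :: PySem.List.insertBy (fun a b => decide (key b < key a)) x ys := by
        simp [PySem.List.insertBy, h]
      rw [hstep]
      refine List.Pairwise.cons ?_ (ih hys (fun a ha hk => h2 a (List.mem_cons_of_mem _ ha) hk))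
      intro b hb
      rcases (PySem.List.mem_insertBy _ _ _ _).mp hb with rfl | hbys
      · rcases lt_or_eq_of_le (not_lt.mp h) with hlt | heq
        · exact Or.inl hlt
        · exact Or.inr ⟨heq.symm, h2 y (List.mem_cons_self) heq.symm⟩
      · exact hyall b hbys

theorem stableR_sorted_rev {α κ : Type} [LinearOrder κ] (key : α → κ) (Q : α → α → Prop)
    (xs : List α) (hxs : xs.Pairwise Q) :
    (PySem.List.sorted xs key true).Pairwise
      (fun a b => key b < key a ∨ (key a = key b ∧ Q a b)) := by
  rw [PySem.List.sorted_rev_eq_foldl_insertBy]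
  suffices h : ∀ (ys : List α), ys.Pairwise Q → ∀ (acc : List α),
      acc.Pairwise (fun a b => key b < key a ∨ (key a = key b ∧ Q a b)) →
      (∀ a ∈ acc, ∀ x ∈ ys, Q a x) →
      (ys.foldl (fun acc x => PySem.List.insertBy (fun a b => decide (key b < key a)) x acc) acc).Pairwise
        (fun a b => key b < key a ∨ (key a = key b ∧ Q a b)) by
    exact h xs hxs [] (by simp) (by simp)
  intro ys
  induction ys with
  | nil => intro _ acc h1 _; simpa using h1
  | cons x rest ih =>
    intro hys acc h1 h2
    obtain ⟨hxQ, hrestQ⟩ := List.pairwise_cons.mp hys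
    simp only [List.foldl_cons]
    apply ih hrestQ
    · exact stableR_insertBy key Q x acc h1 (fun a ha _ => h2 a ha x (List.mem_cons_self))
    · intro a ha z hz
      rcases (PySem.List.mem_insertBy _ _ _ _).mp ha with rfl | haacc
      · exact hxQ z hz
      · exact h2 a haacc z (List.mem_cons_of_mem _ hz)

theorem chars_join_flatten (xss : List (List Char)) :
    PySem.Chars.join [] xss = xss.flatten := by
  induction xss with
  | nil => simp [PySem.Chars.join_nil]
  | cons a rest ih =>
    cases rest with
    | nil => simp [PySem.Chars.join_singleton]
    | cons b rest' =>
      rw [PySem.Chars.join_cons_cons]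
      simp only [List.flatten_cons] at *
      simp [ih]

theorem counts_eq (rn : List String) :
    rn.foldl (fun d w => w.toList.foldl (fun d c => d.insert c (d.getD c 0 + 1)) d) PySem.Dict.empty
      = PySem.Dict.counter ((rn.map String.toList).flatten) := by
  rw [← PySem.Dict.foldl_insert_getD_add_one_eq_counter]
  have key : ∀ (ls : List (List Char)) (d : PySem.Dict Char Int),
      (ls.flatten).foldl (fun d c => d.insert c (d.getD c 0 + 1)) d
        = ls.foldl (fun d w => w.foldl (fun d c => d.insert c (d.getD c 0 + 1)) d) d := by
    intro ls
    induction ls with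
    | nil => intro d; simp
    | cons w ws ih => intro d; simp [List.foldl_append, ih]
  rw [key, List.foldl_map]

-- ---- facts about the counter items ----

theorem mem_items_iff (chars : List Char) (p : Char × Int) :
    p ∈ (PySem.Dict.counter chars).items ↔ p.1 ∈ chars ∧ p.2 = (chars.count p.1 : Int) := by
  rw [PySem.Dict.items_counter]
  constructor
  · intro hp
    rcases List.mem_map.mp hp with ⟨k, hk, rfl⟩
    exact ⟨(PySem.Set.mem_ofList chars k).mp hk, rfl⟩
  · rintro ⟨hc, h2⟩
    refine List.mem_map.mpr ⟨p.1, (PySem.Set.mem_ofList chars p.1).mpr hc, ?_⟩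
    exact Prod.ext rfl h2.symm

theorem items_fst (chars : List Char) :
    ((PySem.Dict.counter chars).items).map (fun p => p.1) = PySem.Set.ofList chars := by
  rw [PySem.Dict.items_counter, List.map_map]
  simp [Function.comp_def]

-- ---- A's full sorted letter list ----

def listA (chars : List Char) : List Char :=
  (PySem.List.sorted
      (PySem.List.sorted (PySem.List.sorted (PySem.Dict.counter chars).items (fun p => p.2) true)
        (fun p => p.1) false)
      (fun p => p.2) true).map (fun p => p.1)

theorem listA_facts (chars : List Char) :
    (listA chars).Pairwise (keyR chars) ∧ (∀ c, c ∈ listA chars ↔ c ∈ chars)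
      ∧ (listA chars).Nodup := by
  unfold listA
  set items := (PySem.Dict.counter chars).items with hitems
  set mc1 := PySem.List.sorted (PySem.List.sorted items (fun p => p.2) true) (fun p => p.1) false with hmc1
  set mc2 := PySem.List.sorted mc1 (fun p => p.2) true with hmc2
  have hperm1 : mc1.Perm items :=
    (PySem.List.sorted_perm _ _ _).trans (PySem.List.sorted_perm _ _ _)
  have hperm2 : mc2.Perm items := (PySem.List.sorted_perm _ _ _).trans hperm1
  have hfstnodup : (items.map (fun p => p.1)).Nodup := by
    rw [items_fst]; exact PySem.Set.nodup_ofList chars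
  have hmc1lt : mc1.Pairwise (fun a b => a.1 < b.1) := by
    apply pairwise_lt_of_le_nodup
    · exact PySem.List.sorted_pairwise _ _
    · exact ((hperm1.map (fun p => p.1)).nodup_iff).mpr hfstnodup
  have hmc2R : mc2.Pairwise (fun a b => b.2 < a.2 ∨ (a.2 = b.2 ∧ a.1 < b.1)) :=
    stableR_sorted_rev (fun p => p.2) (fun a b => a.1 < b.1) mc1 hmc1lt
  have hmem2 : ∀ p ∈ mc2, p.1 ∈ chars ∧ p.2 = (chars.count p.1 : Int) := by
    intro p hp
    exact (mem_items_iff chars p).mp (hperm2.mem_iff.mp hp)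
  refine ⟨?_, ?_, ?_⟩
  · rw [List.pairwise_map]
    refine hmc2R.imp_of_mem ?_
    intro a b ha hb hR
    obtain ⟨_, ha2⟩ := hmem2 a ha
    obtain ⟨_, hb2⟩ := hmem2 b hb
    unfold keyR
    rw [← ha2, ← hb2]
    exact hR
  · intro c
    rw [(hperm2.map (fun p => p.1)).mem_iff, items_fst]
    exact PySem.Set.mem_ofList chars c
  · exact ((hperm2.map (fun p => p.1)).nodup_iff).mpr hfstnodup

-- ---- B's selection loop picks listA's elements in order ----

-- the membership guard restricts the scan to the not-yet-taken letters
theorem foldl_guard {α : Type} (top : List Char) (f : Option α → Char → Option α) :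
    ∀ (l : List Char) (cur : Option α),
      l.foldl (fun best c => if top.contains c then best else f best c) cur
        = (l.filter (fun c => !top.contains c)).foldl f cur := by
  intro l
  induction l with
  | nil => intro cur; simp
  | cons c cs ih =>
    intro cur
    cases h : top.contains c with
    | true =>
      simp only [List.foldl_cons, List.filter_cons, h, Bool.not_true, if_true, if_false,
        Bool.false_eq_true]
      exact ih cur
    | false =>
      simp only [List.foldl_cons, List.filter_cons, h, Bool.not_false, if_true, if_false,
        Bool.false_eq_true]
      exact ih (f cur c)

-- a fold keeping the strictly better candidate returns the dominant element
theorem maxfold_eq (chars : List Char) (b : Char) :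
    ∀ (rs : List Char) (cur : Option Char),
      (∀ c ∈ rs, c = b ∨ keyR chars b c) →
      (cur = some b ∨ ((∀ x, cur = some x → keyR chars b x) ∧ b ∈ rs)) →
      rs.foldl
        (fun best c =>
          match best with
          | none => some c
          | some x =>
            if (chars.count x : Int) < chars.count c ∨ ((chars.count c : Int) = chars.count x ∧ c < x)
            then some c else best)
        cur = some b := by
  intro rs
  induction rs with
  | nil =>
    intro cur _ hcur
    rcases hcur with rfl | ⟨_, hb⟩
    · rfl
    · exact absurd hb (List.not_mem_nil)
  | cons c cs ih =>
    intro cur hdom hcur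
    have hdomc := hdom c (List.mem_cons_self)
    simp only [List.foldl_cons]
    rcases hcur with rfl | ⟨hbetter, hbmem⟩
    · -- current best is b already: b survives the comparison with c
      have hkeep :
          (match some b with
            | none => some c
            | some x =>
              if (chars.count x : Int) < chars.count c ∨ ((chars.count c : Int) = chars.count x ∧ c < x)
              then some c else some b) = some b := by
        rcases hdomc with heq | hbc
        · subst heq
          simp only []
          rw [if_neg]
          rintro (h | ⟨_, h⟩)
          · exact absurd h (lt_irrefl _)
          · exact absurd h (lt_irrefl _)
        · simp only []
          rw [if_neg]
          intro hcb
          exact keyR_asymm chars b c hbc hcb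
      rw [hkeep]
      exact ih _ (fun z hz => hdom z (List.mem_cons_of_mem _ hz)) (Or.inl rfl)
    · -- b still ahead: the new current best is b itself or dominated by b
      rcases Option.eq_none_or_eq_some cur with rfl | ⟨x, rfl⟩
      · rcases hdomc with heq | hbc
        · subst heq
          exact ih _ (fun z hz => hdom z (List.mem_cons_of_mem _ hz)) (Or.inl rfl)
        · have hbcs : b ∈ cs := by
            rcases List.mem_cons.mp hbmem with rfl | h
            · exact absurd hbc (fun h => keyR_asymm chars b b h h)
            · exact h
          exact ih _ (fun z hz => hdom z (List.mem_cons_of_mem _ hz))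
            (Or.inr ⟨fun z hz => by cases hz; exact hbc, hbcs⟩)
      · have hbx := hbetter x rfl
        rcases hdomc with heq | hbc
        · -- c = b: c wins against the dominated x
          have hbx' : keyR chars c x := heq ▸ hbx
          have hstep :
              (match some x with
                | none => some c
                | some y =>
                  if (chars.count y : Int) < chars.count c ∨ ((chars.count c : Int) = chars.count y ∧ c < y)
                  then some c else some x) = some c := by
            simp only []
            rw [if_pos]
            unfold keyR at hbx'
            exact hbx'
          rw [hstep]
          exact ih _ (fun z hz => hdom z (List.mem_cons_of_mem _ hz)) (Or.inl (by rw [heq]))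
        · have hbcs : b ∈ cs := by
            rcases List.mem_cons.mp hbmem with rfl | h
            · exact absurd hbc (fun h => keyR_asymm chars b b h h)
            · exact h
          refine ih _ (fun z hz => hdom z (List.mem_cons_of_mem _ hz)) (Or.inr ⟨?_, hbcs⟩)
          intro z hz
          simp only [] at hz
          split_ifs at hz with hcond
          · cases hz; exact hbc
          · cases hz; exact hbx

theorem pickBest_eq (chars : List Char) (top : List Char) :
    pickBest (PySem.Dict.counter chars) top
      = ((PySem.Set.ofList chars).filter (fun c => !top.contains c)).foldl
          (fun best c =>
            match best with
            | none => some c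
            | some x =>
              if (chars.count x : Int) < chars.count c ∨ ((chars.count c : Int) = chars.count x ∧ c < x)
              then some c else best)
          none := by
  unfold pickBest
  rw [PySem.Dict.items_counter, List.foldl_map]
  simp only [PySem.Dict.getD_counter]
  rw [← foldl_guard]

theorem pickLoop_take (chars : List Char) :
    ∀ (k j : Nat),
      pickLoop (PySem.Dict.counter chars) k ((listA chars).take j) = (listA chars).take (j + k) := by
  obtain ⟨hpair, hmem, hnodup⟩ := listA_facts chars
  intro k
  induction k with
  | zero => intro j; simp [pickLoop]
  | succ k ih =>
    intro j
    by_cases hj : (listA chars).length ≤ j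
    · -- everything already taken: the scan finds nothing and the loop breaks
      have htake : (listA chars).take j = listA chars := List.take_of_length_le hj
      have hfilter : ((PySem.Set.ofList chars).filter (fun c => !((listA chars).take j).contains c)) = [] := by
        rw [htake]
        apply List.filter_eq_nil_iff.mpr
        intro c hc
        have : c ∈ listA chars := (hmem c).mpr ((PySem.Set.mem_ofList chars c).mp hc)
        simp [this]
      have hpb : pickBest (PySem.Dict.counter chars) ((listA chars).take j) = none := by
        rw [pickBest_eq, hfilter]
        rfl
      show pickLoop (PySem.Dict.counter chars) (k + 1) ((listA chars).take j) = _
      rw [pickLoop, hpb]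
      rw [htake, List.take_of_length_le (by omega)]
    · -- the next letter of listA is picked
      rw [not_le] at hj
      set L := listA chars with hL
      have hLsplit : L = L.take j ++ L[j] :: L.drop (j + 1) := by
        conv_lhs => rw [← List.take_append_drop j L]
        rw [List.drop_eq_getElem_cons hj]
      have hbdom : ∀ c ∈ (PySem.Set.ofList chars).filter (fun c => !(L.take j).contains c),
          c = L[j] ∨ keyR chars L[j] c := by
        intro c hc
        obtain ⟨hcs, hcnot⟩ := List.mem_filter.mp hc
        have hcL : c ∈ L := (hmem c).mpr ((PySem.Set.mem_ofList chars c).mp hcs)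
        have hcnottake : c ∉ L.take j := by simpa using hcnot
        have hcdrop : c ∈ L[j] :: L.drop (j + 1) := by
          rcases List.mem_append.mp (hLsplit ▸ hcL) with h | h
          · exact absurd h hcnottake
          · exact h
        rcases List.mem_cons.mp hcdrop with rfl | h
        · exact Or.inl rfl
        · right
          have hp := hpair
          rw [hLsplit, List.pairwise_append] at hp
          obtain ⟨_, hp2, _⟩ := hp
          exact (List.pairwise_cons.mp hp2).1 c h
      have hbmem : L[j] ∈ (PySem.Set.ofList chars).filter (fun c => !(L.take j).contains c) := by
        apply List.mem_filter.mpr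
        constructor
        · exact (PySem.Set.mem_ofList chars _).mpr ((hmem _).mp (List.getElem_mem hj))
        · have hnot : L[j] ∉ L.take j := by
            intro h
            have hnd := hnodup
            rw [hLsplit, List.nodup_append] at hnd
            exact hnd.2.2 _ h _ (List.mem_cons_self) rfl
          simpa using hnot
      have hpb : pickBest (PySem.Dict.counter chars) (L.take j) = some L[j] := by
        rw [pickBest_eq]
        exact maxfold_eq chars L[j] _ none hbdom (Or.inr ⟨by simp, hbmem⟩)
      show pickLoop (PySem.Dict.counter chars) (k + 1) (L.take j) = _
      rw [pickLoop, hpb]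
      have htake1 : L.take j ++ [L[j]] = L.take (j + 1) := by
        rw [List.take_add_one, List.getElem?_eq_getElem hj]
        rfl
      simp only []
      rw [htake1, ih (j + 1)]
      congr 1
      omega

-- ===== VERDICT (by name: the statement is the Claim_ definition above) =====
theorem valid_room_spec : Claim_equal_valid_room := by
  intro rn cs _
  unfold Spec_valid_room valid_room valid_room_alt
  simp only []
  have hchars : (PySem.Str.join "" rn).toList = (rn.map String.toList).flatten := by
    rw [PySem.Str.toList_join]
    exact chars_join_flatten _
  set chars := (rn.map String.toList).flatten with hcharsdef
  rw [hchars, counts_eq]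
  have htop : pickLoop (PySem.Dict.counter chars) 5 [] = (listA chars).take 5 := by
    have := pickLoop_take chars 5 0
    simpa using this
  set mc2 := PySem.List.sorted
      (PySem.List.sorted (PySem.List.sorted (PySem.Dict.counter chars).items (fun p => p.2) true)
        (fun p => p.1) false) (fun p => p.2) true with hmc2
  have hslice : PySem.List.slice mc2 none (some 5) = mc2.take 5 := by
    rw [PySem.List.slice_to mc2 (by norm_num)]
    rw [show ((5:Int).toNat) = 5 from rfl]
  have hstr : PySem.Str.join "" ((mc2.take 5).map (fun p => String.ofList [p.1]))
      = String.ofList ((mc2.map (fun p => p.1)).take 5) := by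
    apply String.ext
    rw [PySem.Str.toList_join]
    simp only [List.map_map]
    rw [show (String.toList ∘ fun p : Char × Int => String.ofList [p.1]) = (fun p : Char × Int => [p.1]) by
      funext p; simp]
    have hjoin : PySem.Chars.join ("".toList) ((mc2.take 5).map (fun p : Char × Int => [p.1]))
        = (mc2.take 5).map (fun p => p.1) := by
      have := PySem.Chars.join_nil_singletons ((mc2.take 5).map (fun p => p.1))
      rw [List.map_map] at this
      simpa using this
    rw [hjoin]
    simp [List.map_take]
  rw [hslice, hstr, htop]
  rfl
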